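-- pv_equiv track=rewrite | github.com/ThienCheese/mev-inspect-pyrevm | mev_inspect/detectors/arbitrage.py | _find_arbitrage_paths
-- ===== SOURCE A (Python) =====
-- from typing import Dict, List, Optional, Set, Tuple
--
-- def _find_arbitrage_paths(
--
--     token_start: str,
--     token_end: str,
--     pool_graph: Dict[str, List[Dict]],
--     max_length: int,
-- ) -> List[List[Dict]]:
--     """Find all paths from token_start to token_end."""
--     paths = []
--
--     def dfs(current: str, path: List[Dict], visited: Set[str]):
--         if len(path) >= max_length:
--             return
--
--         if current == token_end and len(path) > 0:
--             paths.append(path.copy())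
--             return
--
--         if current not in pool_graph:
--             return
--
--         for edge in pool_graph[current]:
--             next_token = edge["token_out"]
--             if next_token not in visited:
--                 visited.add(next_token)
--                 path.append(edge)
--                 dfs(next_token, path, visited)
--                 path.pop()
--                 visited.remove(next_token)
--
--     dfs(token_start, [], {token_start})
--     return paths
-- ===== SOURCE B (Python) =====
-- def _find_arbitrage_paths(token_start, token_end, pool_graph, max_length):
--     """Find all paths from token_start to token_end (iterative DFS with an explicit frame stack)."""
--     paths = []
--     stack = [(token_start, [], {token_start})]
--     while stack:
--         current, path, visited = stack.pop()
--         if len(path) >= max_length: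
--             continue
--         if current == token_end and len(path) > 0:
--             paths.append(path)
--             continue
--         if current not in pool_graph:
--             continue
--         for edge in reversed(pool_graph[current]):
--             next_token = edge["token_out"]
--             if next_token not in visited:
--                 stack.append((next_token, path + [edge], visited | {next_token}))
--     return paths
-- ===== Notes on version B (the rewrite author's own statement) =====
-- stated objective: alternative
-- what changed: The recursive backtracking DFS with shared mutable path/visited/paths state is replaced by an iterative DFS over an explicit stack of immutable (token, path, visited) frames, pushing successors in reverse edge order so completed paths appear in the identical pre-order.
-- outside the precondition, e.g. on _find_arbitrage_paths('a', 'b', {'a': [{'x': 'y'}]}, 2): A raises KeyError, B raises KeyError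
import Mathlib
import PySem

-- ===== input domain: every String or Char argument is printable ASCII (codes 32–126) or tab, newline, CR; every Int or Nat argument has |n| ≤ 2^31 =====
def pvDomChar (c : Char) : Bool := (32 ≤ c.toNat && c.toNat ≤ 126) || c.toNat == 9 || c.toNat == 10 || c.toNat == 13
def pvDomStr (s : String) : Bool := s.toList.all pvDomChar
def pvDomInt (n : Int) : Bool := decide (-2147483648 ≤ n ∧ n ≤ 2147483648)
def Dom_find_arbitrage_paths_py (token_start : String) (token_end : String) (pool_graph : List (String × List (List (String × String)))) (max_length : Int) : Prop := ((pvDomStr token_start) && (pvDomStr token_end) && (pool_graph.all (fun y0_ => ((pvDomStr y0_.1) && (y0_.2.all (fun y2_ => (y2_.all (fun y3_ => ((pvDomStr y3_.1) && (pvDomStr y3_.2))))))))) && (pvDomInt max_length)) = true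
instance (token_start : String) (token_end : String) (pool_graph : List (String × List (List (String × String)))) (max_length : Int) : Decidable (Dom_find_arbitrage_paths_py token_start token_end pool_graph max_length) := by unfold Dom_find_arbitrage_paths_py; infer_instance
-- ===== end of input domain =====

-- B replaces A's recursive backtracking DFS (shared mutable path/visited) by an iterative DFS over an
-- explicit stack of immutable frames, pushing successors in reverse edge order (objective: alternative).

-- ===== PORT A =====

-- depth bound for the DFS recursion: visited grows by one token (drawn from the graph's edges) per level,
-- so total-edge-count + 1 levels always suffice; the fuel is only a totality guard, never reached.
def pvFuel (pool_graph : List (String × List (List (String × String)))) : Nat :=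
  (pool_graph.map (fun kv => kv.2.length)).sum + 1

-- the inner 'dfs' closure of A ('paths' is the accumulated nonlocal list; appends go to its right end);
-- edge["token_out"] is ported as getD with default "" — exact under Pre_ (key present; Python raises KeyError otherwise)
def pvA_dfs (token_end : String) (pool_graph : List (String × List (List (String × String)))) (max_length : Int) :
    Nat → String → List (List (String × String)) → PySem.Set String →
    List (List (List (String × String))) → List (List (List (String × String)))
  | 0, _, _, _, paths => paths
  | f+1, current, path, visited, paths =>
    if max_length ≤ (path.length : Int) then paths
    else if current = token_end ∧ 0 < path.length then paths ++ [path]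
    else
      match (PySem.Dict.mk pool_graph).get? current with
      | none => paths
      | some edges =>
          edges.foldl (fun acc edge =>
            let next_token := (PySem.Dict.mk edge).getD "token_out" ""
            if PySem.Set.contains visited next_token then acc
            else pvA_dfs token_end pool_graph max_length f next_token (path ++ [edge])
                   (PySem.Set.add visited next_token) acc) paths

def find_arbitrage_paths_py (token_start : String) (token_end : String) (pool_graph : List (String × List (List (String × String)))) (max_length : Int) : List (List (List (String × String))) :=
  pvA_dfs token_end pool_graph max_length (pvFuel pool_graph) token_start [] (PySem.Set.ofList [token_start]) []

-- ===== PORT B =====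

-- largest adjacency-list length in the graph (used only by the loop's termination measure)
def pvK (pool_graph : List (String × List (List (String × String)))) : Nat :=
  (pool_graph.map (fun kv => kv.2.length)).foldr max 0

-- B's inner 'for edge in reversed(pool_graph[current]): … stack.append(…)' (list head = stack top)
def pvB_push (f : Nat) (path : List (List (String × String))) (visited : PySem.Set String)
    (edges : List (List (String × String)))
    (stack : List (Nat × String × List (List (String × String)) × PySem.Set String)) :
    List (Nat × String × List (List (String × String)) × PySem.Set String) :=
  edges.reverse.foldl (fun st edge =>
    let next_token := (PySem.Dict.mk edge).getD "token_out" ""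
    if PySem.Set.contains visited next_token then st
    else (f, next_token, path ++ [edge], PySem.Set.add visited next_token) :: st) stack

-- termination measure for the while-loop: each frame with fuel f weighs (K+1)^f
def pvW (K : Nat) (stack : List (Nat × String × List (List (String × String)) × PySem.Set String)) : Nat :=
  (stack.map (fun fr => (K+1)^fr.1)).sum

-- (termination support, cited by pvB_loop's decreasing_by)
theorem pvK_bound (pool_graph : List (String × List (List (String × String)))) (current : String)
    (edges : List (List (String × String)))
    (h : (PySem.Dict.mk pool_graph).get? current = some edges) : edges.length ≤ pvK pool_graph := by
  induction pool_graph with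
  | nil => simp [PySem.Dict.get?] at h
  | cons kv rest ih =>
    rw [PySem.Dict.get?_mk_cons] at h
    by_cases hk : (kv.1 == current) = true
    · simp [hk] at h
      simp [pvK, ← h]
    · simp [hk] at h
      have := ih h
      simp only [pvK, List.map_cons, List.foldr_cons]
      exact le_trans this (le_max_right _ _)

theorem pvW_push_le (K f : Nat) (path : List (List (String × String))) (visited : PySem.Set String)
    (edges : List (List (String × String)))
    (stack : List (Nat × String × List (List (String × String)) × PySem.Set String)) :
    pvW K (pvB_push f path visited edges stack) ≤ edges.length * (K+1)^f + pvW K stack := by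
  have key : ∀ (l : List (List (String × String))) (st : List (Nat × String × List (List (String × String)) × PySem.Set String)),
      pvW K (l.foldl (fun st edge =>
        let next_token := (PySem.Dict.mk edge).getD "token_out" ""
        if PySem.Set.contains visited next_token then st
        else (f, next_token, path ++ [edge], PySem.Set.add visited next_token) :: st) st)
      ≤ l.length * (K+1)^f + pvW K st := by
    intro l
    induction l with
    | nil => intro st; simp
    | cons e rest ih =>
      intro st
      simp only [List.foldl_cons, List.length_cons]
      refine le_trans (ih _) ?_
      have hw : pvW K (if PySem.Set.contains visited ((PySem.Dict.mk e).getD "token_out" "") = true then st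
          else (f, (PySem.Dict.mk e).getD "token_out" "", path ++ [e],
                 PySem.Set.add visited ((PySem.Dict.mk e).getD "token_out" "")) :: st)
          ≤ (K+1)^f + pvW K st := by
        by_cases hc : PySem.Set.contains visited ((PySem.Dict.mk e).getD "token_out" "") = true
        · rw [if_pos hc]; omega
        · rw [if_neg hc]; simp [pvW]
      refine le_trans (Nat.add_le_add_left hw _) (le_of_eq ?_)
      ring
  have := key edges.reverse stack
  simpa [pvB_push, List.length_reverse] using this

-- the two decreasing facts pvB_loop's decreasing_by cites by name (kept as named theorems so the
-- loop's own definition value stays small)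
theorem pvDecPop (K f : Nat) (current : String) (path : List (List (String × String))) (visited : PySem.Set String)
    (S : List (Nat × String × List (List (String × String)) × PySem.Set String)) :
    pvW K S < pvW K ((f, current, path, visited) :: S) := by
  have hrw : pvW K ((f, current, path, visited) :: S) = (K+1)^f + pvW K S := by simp [pvW]
  rw [hrw]
  have : 0 < (K+1)^f := Nat.pow_pos (by omega)
  omega

theorem pvDecPush (pool_graph : List (String × List (List (String × String)))) (f : Nat) (current : String)
    (path : List (List (String × String))) (visited : PySem.Set String)
    (edges : List (List (String × String)))
    (S : List (Nat × String × List (List (String × String)) × PySem.Set String))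
    (hg : (PySem.Dict.mk pool_graph).get? current = some edges) :
    pvW (pvK pool_graph) (pvB_push f path visited edges S)
      < pvW (pvK pool_graph) ((f+1, current, path, visited) :: S) := by
  have hrw : pvW (pvK pool_graph) ((f+1, current, path, visited) :: S)
      = (pvK pool_graph + 1)^f * (pvK pool_graph + 1) + pvW (pvK pool_graph) S := by
    simp [pvW, pow_succ]
  rw [hrw]
  have h1 := pvW_push_le (pvK pool_graph) f path visited edges S
  have h2 := pvK_bound pool_graph current edges hg
  have h3 : 0 < (pvK pool_graph + 1)^f := Nat.pow_pos (by omega)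
  have h5 : edges.length * (pvK pool_graph + 1)^f ≤ pvK pool_graph * (pvK pool_graph + 1)^f :=
    Nat.mul_le_mul_right _ h2
  nlinarith

-- B's while-loop: pop the top frame, apply A's guards, push successors; frame fuel mirrors pvFuel
def pvB_loop (token_end : String) (pool_graph : List (String × List (List (String × String)))) (max_length : Int) :
    List (Nat × String × List (List (String × String)) × PySem.Set String) →
    List (List (List (String × String))) → List (List (List (String × String)))
  | [], paths => paths
  | (0, _, _, _) :: S, paths => pvB_loop token_end pool_graph max_length S paths
  | (f+1, current, path, visited) :: S, paths =>
    if max_length ≤ (path.length : Int) then pvB_loop token_end pool_graph max_length S paths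
    else if current = token_end ∧ 0 < path.length then pvB_loop token_end pool_graph max_length S (paths ++ [path])
    else
      match hg : (PySem.Dict.mk pool_graph).get? current with
      | none => pvB_loop token_end pool_graph max_length S paths
      | some edges => pvB_loop token_end pool_graph max_length (pvB_push f path visited edges S) paths
  termination_by stack _ => pvW (pvK pool_graph) stack
  decreasing_by
  · exact pvDecPop _ _ _ _ _ _
  · exact pvDecPop _ _ _ _ _ _
  · exact pvDecPop _ _ _ _ _ _
  · exact pvDecPop _ _ _ _ _ _
  · exact pvDecPush pool_graph f current path visited edges S hg

def find_arbitrage_paths_py_alt (token_start : String) (token_end : String) (pool_graph : List (String × List (List (String × String)))) (max_length : Int) : List (List (List (String × String))) :=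
  pvB_loop token_end pool_graph max_length
    [(pvFuel pool_graph, token_start, [], PySem.Set.ofList [token_start])] []

-- ===== PRECONDITION & SPEC =====
-- Pre_ excludes inputs on which the traversal may reach an edge dict lacking the "token_out" key, where A
-- raises KeyError; this over-approximation also excludes some inputs where the keyless edge is unreachable
-- and A returns normally (see cites).
def Pre_find_arbitrage_paths_py (token_start : String) (token_end : String) (pool_graph : List (String × List (List (String × String)))) (max_length : Int) : Prop :=
  max_length ≤ 0 ∨ (∀ kv ∈ pool_graph, kv.1 ≠ token_start) ∨
    (∀ kv ∈ pool_graph, ∀ edge ∈ kv.2, "token_out" ∈ edge.map Prod.fst)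
instance (token_start : String) (token_end : String) (pool_graph : List (String × List (List (String × String)))) (max_length : Int) : Decidable (Pre_find_arbitrage_paths_py token_start token_end pool_graph max_length) := by unfold Pre_find_arbitrage_paths_py; infer_instance

def pvWitness_find_arbitrage_paths_py : String × String × (List (String × List (List (String × String)))) × Int :=
  ("a", "b", [("a", [[("token_out", "b")]])], 2)

def Spec_find_arbitrage_paths_py (token_start : String) (token_end : String) (pool_graph : List (String × List (List (String × String)))) (max_length : Int) (out : List (List (List (String × String)))) : Prop := out = find_arbitrage_paths_py_alt token_start token_end pool_graph max_length
instance (token_start : String) (token_end : String) (pool_graph : List (String × List (List (String × String)))) (max_length : Int) (out : List (List (List (String × String)))) : Decidable (Spec_find_arbitrage_paths_py token_start token_end pool_graph max_length out) := by unfold Spec_find_arbitrage_paths_py; infer_instance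

-- ===== CLAIM (what is proved, stated in full; the proofs are below) =====
def Claim_equal_find_arbitrage_paths_py : Prop := ∀ (token_start : String) (token_end : String) (pool_graph : List (String × List (List (String × String)))) (max_length : Int), Dom_find_arbitrage_paths_py token_start token_end pool_graph max_length → Pre_find_arbitrage_paths_py token_start token_end pool_graph max_length → Spec_find_arbitrage_paths_py token_start token_end pool_graph max_length (find_arbitrage_paths_py token_start token_end pool_graph max_length)

-- ===== LEMMAS AND PROOFS =====

-- unfolding pvB_push over a cons: the FIRST edge ends on TOP of the pushed segment
theorem pvB_push_cons (f : Nat) (path : List (List (String × String))) (visited : PySem.Set String)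
    (e : List (String × String)) (rest : List (List (String × String)))
    (stack : List (Nat × String × List (List (String × String)) × PySem.Set String)) :
    pvB_push f path visited (e :: rest) stack =
      (if PySem.Set.contains visited ((PySem.Dict.mk e).getD "token_out" "") then
         pvB_push f path visited rest stack
       else (f, (PySem.Dict.mk e).getD "token_out" "", path ++ [e],
              PySem.Set.add visited ((PySem.Dict.mk e).getD "token_out" "")) ::
              pvB_push f path visited rest stack) := by
  simp [pvB_push, List.reverse_cons, List.foldl_append]

-- the central bridge: running the loop on a frame then the rest of the stack equals running A's dfs
-- on that frame (with the same fuel) and then the rest of the stack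
theorem pvB_loop_eq_dfs (token_end : String) (pool_graph : List (String × List (List (String × String)))) (max_length : Int) :
    ∀ (f : Nat) (current : String) (path : List (List (String × String))) (visited : PySem.Set String)
      (S : List (Nat × String × List (List (String × String)) × PySem.Set String))
      (paths : List (List (List (String × String)))),
    pvB_loop token_end pool_graph max_length ((f, current, path, visited) :: S) paths
      = pvB_loop token_end pool_graph max_length S
          (pvA_dfs token_end pool_graph max_length f current path visited paths) := by
  intro f
  induction f with
  | zero =>
    intro current path visited S paths
    rw [pvB_loop, pvA_dfs]
  | succ f ih =>
    intro current path visited S paths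
    rw [pvB_loop, pvA_dfs]
    by_cases h1 : max_length ≤ (path.length : Int)
    · simp [h1]
    · simp only [h1, if_false]
      by_cases h2 : current = token_end ∧ 0 < path.length
      · simp [h2]
      · simp only [h2, if_false]
        cases hg : (PySem.Dict.mk pool_graph).get? current with
        | none => rfl
        | some edges =>
          -- inner induction over the edge list: pushed frames versus A's foldl
          have inner : ∀ (l : List (List (String × String))) (S' : List (Nat × String × List (List (String × String)) × PySem.Set String))
              (acc : List (List (List (String × String)))),
              pvB_loop token_end pool_graph max_length (pvB_push f path visited l S') acc
                = pvB_loop token_end pool_graph max_length S'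
                    (l.foldl (fun acc edge =>
                      let next_token := (PySem.Dict.mk edge).getD "token_out" ""
                      if PySem.Set.contains visited next_token then acc
                      else pvA_dfs token_end pool_graph max_length f next_token (path ++ [edge])
                             (PySem.Set.add visited next_token) acc) acc) := by
            intro l
            induction l with
            | nil => intro S' acc; simp [pvB_push]
            | cons e rest ihl =>
              intro S' acc
              rw [pvB_push_cons]
              simp only [List.foldl_cons]
              by_cases hc : PySem.Set.contains visited ((PySem.Dict.mk e).getD "token_out" "") = true
              · rw [if_pos hc, if_pos hc]
                exact ihl S' acc
              · rw [if_neg hc, if_neg hc, ih]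
                exact ihl S' _
          exact inner edges S paths

-- ===== VERDICT (by name: the statement is the Claim_ definition above) =====
theorem find_arbitrage_paths_py_spec : Claim_equal_find_arbitrage_paths_py := by
  unfold Claim_equal_find_arbitrage_paths_py
  intro token_start token_end pool_graph max_length _ _
  unfold Spec_find_arbitrage_paths_py find_arbitrage_paths_py find_arbitrage_paths_py_alt
  rw [pvB_loop_eq_dfs, pvB_loop]
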